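-- pv_equiv track=rewrite | github.com/basilegupov/First_repo | Practice.py | bad_input_a
-- ===== SOURCE A (Python) =====
-- def bad_input_a(string_a):
--     string_b = string_a.split('a')
--     st=''
--     for i in range(len(string_b)):
--         if i%2:
--             st += string_b[i].upper()
--         else:
--             st += string_b[i]
--     return st
-- ===== SOURCE B (Python) =====
-- def bad_input_a(string_a):
--     out = []
--     count = 0
--     for ch in string_a:
--         if ch == 'a':
--             count += 1
--         elif count % 2:
--             out.append(ch.upper())
--         else:
--             out.append(ch)
--     return ''.join(out)
-- ===== Notes on version B (the rewrite author's own statement) =====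
-- stated objective: alternative
-- what changed: Replaces split-on-'a' plus an indexed loop over the segment list with a single character-by-character scan that keeps a running count of 'a's and uppercases a character exactly when that count is odd.
import Mathlib
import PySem

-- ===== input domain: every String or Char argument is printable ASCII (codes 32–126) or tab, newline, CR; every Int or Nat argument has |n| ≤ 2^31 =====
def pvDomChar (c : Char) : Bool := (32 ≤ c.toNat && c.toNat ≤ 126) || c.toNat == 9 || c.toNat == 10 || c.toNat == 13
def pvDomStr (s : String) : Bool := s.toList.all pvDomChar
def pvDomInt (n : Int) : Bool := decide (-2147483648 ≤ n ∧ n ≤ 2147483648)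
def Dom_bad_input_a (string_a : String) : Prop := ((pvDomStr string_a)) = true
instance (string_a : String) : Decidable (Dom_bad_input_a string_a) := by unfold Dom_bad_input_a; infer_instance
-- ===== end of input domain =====

-- B replaces A's split-on-'a' + indexed segment loop by a single char scan with a
-- running count of 'a's (uppercase iff the count is odd); same cost, different structure.

-- ===== PORT A =====
def bad_input_a (string_a : String) : String :=
  let string_b := PySem.Chars.splitOn string_a.toList ['a']
  let st := (PySem.List.pyRange 0 (string_b.length : Int) 1).foldl
    (fun st i =>
      if PySem.Int.mod i 2 ≠ 0 then
        st ++ PySem.Chars.upper (PySem.List.pyGetD string_b i [])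
      else
        st ++ PySem.List.pyGetD string_b i []) ([] : List Char)
  String.ofList st

-- ===== PORT B =====
def bad_input_a_alt (string_a : String) : String :=
  let r := string_a.toList.foldl
    (fun (p : List Char × Nat) ch =>
      if ch = 'a' then (p.1, p.2 + 1)
      else if p.2 % 2 ≠ 0 then (p.1 ++ [PySem.Chars.upperChar ch], p.2)
      else (p.1 ++ [ch], p.2)) (([] : List Char), (0 : Nat))
  String.ofList r.1

-- ===== PRECONDITION & SPEC =====
def Spec_bad_input_a (string_a : String) (out : String) : Prop := out = bad_input_a_alt string_a
instance (string_a : String) (out : String) : Decidable (Spec_bad_input_a string_a out) := by unfold Spec_bad_input_a; infer_instance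

-- ===== CLAIM (what is proved, stated in full; the proofs are below) =====
def Claim_equal_bad_input_a : Prop := ∀ (string_a : String), Dom_bad_input_a string_a → Spec_bad_input_a string_a (bad_input_a string_a)

-- ===== LEMMAS AND PROOFS =====

-- split' cs cur = the list of 'a'-separated segments of cs, with cur the reversed
-- in-progress segment (the state of PySem.Chars.splitOn.go for a one-char separator).
def pvSplit' : List Char → List Char → List (List Char)
  | [], cur => [cur.reverse]
  | c :: r, cur => if c = 'a' then cur.reverse :: pvSplit' r [] else pvSplit' r (c :: cur)

-- the segment-side result: segments from index n on, uppercased at odd indices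
def pvSpecSegs : List (List Char) → Nat → List Char
  | [], _ => []
  | s :: ss, n => (if n % 2 = 1 then PySem.Chars.upper s else s) ++ pvSpecSegs ss (n + 1)

-- the char-side result: stream with n = number of 'a's seen so far
def pvStream : List Char → Nat → List Char
  | [], _ => []
  | c :: r, n =>
    if c = 'a' then pvStream r (n + 1)
    else (if n % 2 = 1 then PySem.Chars.upperChar c else c) :: pvStream r n

lemma pv_go_eq : ∀ (fuel : Nat) (l cur : List Char) (acc : List (List Char)),
    l.length ≤ fuel →
    PySem.Chars.splitOn.go ['a'] fuel l cur acc = acc.reverse ++ pvSplit' l cur := by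
  intro fuel
  induction fuel with
  | zero =>
    intro l cur acc h
    have : l = [] := List.eq_nil_of_length_eq_zero (Nat.le_zero.mp h)
    subst this
    simp [PySem.Chars.splitOn.go, pvSplit']
  | succ fuel ih =>
    intro l cur acc h
    cases l with
    | nil => simp [PySem.Chars.splitOn.go, pvSplit']
    | cons c r =>
      by_cases hc : c = 'a'
      · subst hc
        rw [PySem.Chars.splitOn.go]
        rw [if_pos (show (['a'].isPrefixOf ('a' :: r)) = true by
          simp)]
        have hdr : List.drop ['a'].length ('a' :: r) = r := by simp
        rw [hdr, ih r [] (cur.reverse :: acc) (by simpa using Nat.le_of_succ_le_succ h)]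
        simp [pvSplit']
      · rw [PySem.Chars.splitOn.go]
        rw [if_neg (show ¬ ((['a'].isPrefixOf (c :: r)) = true) by
          simp only [List.isPrefixOf_iff_prefix, List.cons_prefix_cons]
          rintro ⟨h1, -⟩
          exact hc h1.symm)]
        rw [ih r (c :: cur) acc (by simpa using Nat.le_of_succ_le_succ h)]
        simp [pvSplit', hc]

lemma pv_splitOn_eq (cs : List Char) :
    PySem.Chars.splitOn cs ['a'] = pvSplit' cs [] := by
  unfold PySem.Chars.splitOn
  rw [pv_go_eq (cs.length + 1) cs [] [] (Nat.le_succ _)]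
  simp

lemma pv_foldA (full : List (List Char)) :
    ∀ (n k : Nat) (st : List Char), full.length ≤ k + n →
    (PySem.List.pyRange (k : Int) (full.length : Int) 1).foldl
      (fun st i =>
        if PySem.Int.mod i 2 ≠ 0 then
          st ++ PySem.Chars.upper (PySem.List.pyGetD full i [])
        else
          st ++ PySem.List.pyGetD full i []) st
      = st ++ pvSpecSegs (full.drop k) k := by
  intro n
  induction n with
  | zero =>
    intro k st h
    have hk : full.length ≤ k := by omega
    rw [PySem.List.pyRange_one_eq_nil (by exact_mod_cast hk)]
    simp [List.drop_eq_nil_of_le hk, pvSpecSegs]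
  | succ n ih =>
    intro k st h
    by_cases hk : k < full.length
    · rw [PySem.List.pyRange_one_cons (by exact_mod_cast hk)]
      rw [List.foldl_cons]
      have hcast : ((k : Int) + 1) = ((k + 1 : Nat) : Int) := by push_cast; ring
      rw [hcast, ih (k + 1) _ (by omega)]
      have hget : PySem.List.pyGetD full (k : Int) ([] : List Char) = full[k] := by
        simp [PySem.List.pyGetD_natCast, List.getD_eq_getElem?_getD, List.getElem?_eq_getElem hk]
      have hmod : PySem.Int.mod (k : Int) 2 = ((k % 2 : Nat) : Int) := by
        exact_mod_cast PySem.Int.mod_natCast k 2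
      have hdrop : full.drop k = full[k] :: full.drop (k + 1) :=
        List.drop_eq_getElem_cons hk
      rw [hdrop]
      simp only [pvSpecSegs]
      by_cases hpar : k % 2 = 1
      · have h1 : PySem.Int.mod (k : Int) 2 ≠ 0 := by rw [hmod]; omega
        simp [hget, hpar, show ((k : Int) % 2 = 1) by omega]
      · have h1 : ¬ (PySem.Int.mod (k : Int) 2 ≠ 0) := by rw [hmod]; omega
        simp [hget, hpar, show ¬ ((k : Int) % 2 = 1) by omega]
    · have hk' : full.length ≤ k := by omega
      rw [PySem.List.pyRange_one_eq_nil (by exact_mod_cast hk')]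
      simp [List.drop_eq_nil_of_le hk', pvSpecSegs]

lemma pv_bridge : ∀ (cs cur : List Char) (n : Nat),
    pvSpecSegs (pvSplit' cs cur) n
      = (if n % 2 = 1 then PySem.Chars.upper cur.reverse else cur.reverse) ++ pvStream cs n := by
  intro cs
  induction cs with
  | nil => intro cur n; simp [pvSplit', pvSpecSegs, pvStream]
  | cons c r ih =>
    intro cur n
    by_cases hc : c = 'a'
    · subst hc
      rw [show pvSplit' ('a' :: r) cur = cur.reverse :: pvSplit' r [] from by
        simp [pvSplit']]
      rw [show pvStream ('a' :: r) n = pvStream r (n + 1) from by simp [pvStream]]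
      simp only [pvSpecSegs]
      rw [ih [] (n + 1)]
      simp [PySem.Chars.upper]
    · rw [show pvSplit' (c :: r) cur = pvSplit' r (c :: cur) from by simp [pvSplit', hc]]
      rw [show pvStream (c :: r) n
            = (if n % 2 = 1 then PySem.Chars.upperChar c else c) :: pvStream r n from by
        simp [pvStream, hc]]
      rw [ih (c :: cur) n]
      simp only [List.reverse_cons, PySem.Chars.upper, List.map_append, List.map_cons,
        List.map_nil]
      by_cases hpar : n % 2 = 1 <;> simp [hpar]
  
lemma pv_foldB : ∀ (cs acc0 : List Char) (n : Nat),
    (cs.foldl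
      (fun (p : List Char × Nat) ch =>
        if ch = 'a' then (p.1, p.2 + 1)
        else if p.2 % 2 ≠ 0 then (p.1 ++ [PySem.Chars.upperChar ch], p.2)
        else (p.1 ++ [ch], p.2)) (acc0, n)).1
      = acc0 ++ pvStream cs n := by
  intro cs
  induction cs with
  | nil => intro acc0 n; simp [pvStream]
  | cons c r ih =>
    intro acc0 n
    by_cases hc : c = 'a'
    · subst hc
      rw [List.foldl_cons, if_pos rfl,
        show pvStream ('a' :: r) n = pvStream r (n + 1) from by simp [pvStream]]
      exact ih acc0 (n + 1)
    · rw [List.foldl_cons, if_neg hc,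
        show pvStream (c :: r) n
          = (if n % 2 = 1 then PySem.Chars.upperChar c else c) :: pvStream r n from by
        simp [pvStream, hc]]
      by_cases hpar : n % 2 = 1
      · rw [if_pos (show ((acc0, n).2 % 2 ≠ 0) from by show n % 2 ≠ 0; omega), ih]
        simp [hpar]
      · rw [if_neg (show ¬ ((acc0, n).2 % 2 ≠ 0) from by show ¬ n % 2 ≠ 0; omega), ih]
        simp [hpar]

-- ===== VERDICT (by name: the statement is the Claim_ definition above) =====
theorem bad_input_a_spec : Claim_equal_bad_input_a := by
  intro s _
  unfold Spec_bad_input_a bad_input_a bad_input_a_alt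
  simp only []
  rw [pv_splitOn_eq]
  have hA := pv_foldA (pvSplit' s.toList []) (pvSplit' s.toList []).length 0 [] (by omega)
  rw [Nat.cast_zero] at hA
  rw [hA, pv_foldB s.toList [] 0]
  have : pvSpecSegs ((pvSplit' s.toList []).drop 0) 0 = pvStream s.toList 0 := by
    rw [List.drop_zero, pv_bridge]
    simp
  rw [this]
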